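-- pv_equiv track=rewrite | github.com/oongsim/CODINGTEST | this_is_coding_test/DFS,BFS/Q18풀이.py | solution
-- ===== SOURCE A (Python) =====
-- def balanced_index(s):
--     cnt = 0 # 왼쪽 ( 의 개수
--     for i in range(len(s)):
--         if s[i] == '(':
--             cnt += 1
--         elif s[i] == ')':
--             cnt -= 1
--         if cnt == 0:
--             return i
--
-- def check_right(s):
--     cnt = 0 # 왼쪽 ( 의 개수
--     for i in s:
--         if i == '(':
--             cnt += 1
--         else:
--             if cnt == 0: # 짝이 맞지 않은 경우에 False 반환
--                 return False
--             cnt -= 1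
--     return True # 균형잡힌 괄호 문자열인 경우에만 검사하므로 끝까지 가면 모두 cnt == 0 인 상태로 True 반환
--
-- def solution(p):
--     answer = ''
--     # 입력이 빈 문자열인 경우, 빈 문자열을 반환
--     if p == '':
--         return answer
--
--     # 문자열 p를 '균형잡힌 문자열' u,v로 분리
--     index = balanced_index(p)
--     u = p[:index+1]
--     v = p[index+1:]
--
--     # 수행한 결과 문자열을 u에 이어 붙인 후 반환
--     # 문자열 u가 '올바른 괄호 문자열'이면 문자열 v에 대해 처음부터 수행
--     if check_right(u) == True:
--         answer = u + solution(v)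
--
--     # 문자열 u가 '올바른 괄호 문자열'이 아니라면
--     else:
--         answer = '('
--         answer += solution(v)
--         answer += ')'
--         #u = u[1:-1]
--         #u = "".join(reversed(u))
--         #answer += u
--         u = list(u[1:-1])
--         for i in range(len(u)):
--             if u[i] == '(':
--                 u[i] = ')'
--             else:
--                 u[i] = '('
--         answer += ''.join(u)
--     return answer
-- ===== SOURCE B (Python) =====
-- def solution(p):
--     # One pass segments p at each return of the parenthesis counter to zero, while
--     # tracking per segment whether it is "correct" (the checker counter never needs
--     # to go below zero); a second pass over the segments collects output pieces.
--     segs = []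
--     cnt = chk = 0
--     ok = True
--     start = 0
--     for i, c in enumerate(p):
--         if c == '(':
--             cnt += 1
--             chk += 1
--         else:
--             if c == ')':
--                 cnt -= 1
--             if chk == 0:
--                 ok = False
--             else:
--                 chk -= 1
--         if cnt == 0:
--             segs.append((p[start:i + 1], ok))
--             start = i + 1
--             chk = 0
--             ok = True
--     fronts = []
--     backs = []
--     for u, ok in segs:
--         if ok:
--             fronts.append(u)
--         else:
--             fronts.append('(')
--             backs.append(')' + ''.join(')' if c == '(' else '(' for c in u[1:-1]))
--     return ''.join(fronts) + ''.join(reversed(backs))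
-- ===== Notes on version B (the rewrite author's own statement) =====
-- stated objective: faster
-- what changed: Instead of recursively re-scanning the remainder and rebuilding strings at each level, B cuts the input into minimal balanced segments in one pass (tracking each segment's correctness flag as it goes) and assembles the answer from front/back piece lists joined once.
-- outside the precondition, e.g. on solution('('): A raises TypeError, B returns ''; on solution(')'): A raises TypeError, B returns ''
import Mathlib
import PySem

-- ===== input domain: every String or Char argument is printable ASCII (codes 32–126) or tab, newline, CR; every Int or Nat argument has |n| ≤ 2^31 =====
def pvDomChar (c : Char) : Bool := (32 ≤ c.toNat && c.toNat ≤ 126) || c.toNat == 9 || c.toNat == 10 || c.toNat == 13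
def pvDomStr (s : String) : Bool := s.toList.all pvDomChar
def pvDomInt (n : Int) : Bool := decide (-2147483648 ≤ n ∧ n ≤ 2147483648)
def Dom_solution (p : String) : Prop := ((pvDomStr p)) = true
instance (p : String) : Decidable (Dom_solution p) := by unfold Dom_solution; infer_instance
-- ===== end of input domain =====

-- B replaces A's recursive re-scanning by one segmentation pass (tracking a per-segment
-- correctness flag) plus one pass over the segments collecting output pieces.

-- ===== PORT A =====
-- balanced_index: first index i at which the running count reaches 0 (None -> none)
def balancedIndexAux (cnt : Int) (i : Nat) : List Char → Option Nat
  | [] => none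
  | c :: rest =>
    let cnt' := if c = '(' then cnt + 1 else if c = ')' then cnt - 1 else cnt
    if cnt' = 0 then some i else balancedIndexAux cnt' (i + 1) rest

def balancedIndex (s : List Char) : Option Nat := balancedIndexAux 0 0 s

-- check_right: loop with counter; a non-'(' char seen while cnt == 0 -> False
def checkRightAux (cnt : Int) : List Char → Bool
  | [] => true
  | c :: rest =>
    if c = '(' then checkRightAux (cnt + 1) rest
    else if cnt = 0 then false else checkRightAux (cnt - 1) rest

def checkRight (s : List Char) : Bool := checkRightAux 0 s

def solA (l : List Char) : List Char :=
  if h : l = [] then []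
  else
    match balancedIndex l with
    | none => []   -- here Python raises TypeError (None + 1); unreachable under Pre_solution
    | some idx =>
      let u := l.take (idx + 1)
      let v := l.drop (idx + 1)
      if checkRight u then u ++ solA v
      else '(' :: (solA v ++ ')' :: (((u.drop 1).dropLast).map (fun c => if c = '(' then ')' else '(')))
termination_by l.length
decreasing_by
  all_goals
    have hl : 0 < l.length := List.length_pos_iff.mpr h
    simp [List.length_drop]; omega

def solution (p : String) : String := String.mk (solA p.toList)

-- ===== PORT B =====
-- ''.join(')' if c=='(' else '(' for c in u[1:-1])
def flipB (u : List Char) : List Char :=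
  ((u.drop 1).dropLast).map (fun c => if c = '(' then ')' else '(')

-- the segmentation pass: state (cnt, chk, ok, cur); cut whenever cnt returns to 0
def segAux (cnt chk : Int) (ok : Bool) (cur : List Char) : List Char → List (List Char × Bool)
  | [] => []
  | c :: rest =>
    let cnt' := if c = '(' then cnt + 1 else if c = ')' then cnt - 1 else cnt
    let chk' := if c = '(' then chk + 1 else if chk = 0 then chk else chk - 1
    let ok'  := if c = '(' then ok else if chk = 0 then false else ok
    if cnt' = 0 then (cur ++ [c], ok') :: segAux 0 0 true [] rest
    else segAux cnt' chk' ok' (cur ++ [c]) rest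

-- the loop body over segments, state = (fronts, backs)
def stepFB (fb : List (List Char) × List (List Char)) (s : List Char × Bool) :
    List (List Char) × List (List Char) :=
  if s.2 then (fb.1 ++ [s.1], fb.2)
  else (fb.1 ++ [['(']], fb.2 ++ [')' :: flipB s.1])

def solB (p : List Char) : List Char :=
  let segs := segAux 0 0 true [] p
  let fb := segs.foldl stepFB ([], [])
  fb.1.flatten ++ fb.2.reverse.flatten

def solution_alt (p : String) : String := String.mk (solB p.toList)

-- ===== PRECONDITION & SPEC =====
-- exactly the inputs on which Python A returns: the '(' and ')' counts are equal
-- (otherwise some recursive call has balanced_index return None and A raises TypeError)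
def Pre_solution (p : String) : Prop := p.toList.count '(' = p.toList.count ')'
instance (p : String) : Decidable (Pre_solution p) := by unfold Pre_solution; infer_instance

def pvWitness_solution : String := ")(a)x("

def Spec_solution (p : String) (out : String) : Prop := out = solution_alt p
instance (p : String) (out : String) : Decidable (Spec_solution p out) := by unfold Spec_solution; infer_instance

-- ===== CLAIM (what is proved, stated in full; the proofs are below) =====
def Claim_equal_solution : Prop := ∀ (p : String), Dom_solution p → Pre_solution p → Spec_solution p (solution p)

-- ===== LEMMAS AND PROOFS =====

-- the paren-only delta used by balanced_index and the segmentation counter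
def vP (c : Char) : Int := if c = '(' then 1 else if c = ')' then -1 else 0

def psum (l : List Char) : Int := (l.map vP).sum

theorem psum_append (a b : List Char) : psum (a ++ b) = psum a + psum b := by
  simp [psum]

theorem psum_count (l : List Char) :
    psum l = (l.count '(' : Int) - (l.count ')' : Int) := by
  induction l with
  | nil => simp [psum]
  | cons c l ih =>
    by_cases h1 : c = '(' <;> by_cases h2 : c = ')' <;>
      simp [psum, vP, List.count_cons, h1, h2] at ih ⊢ <;> omega

theorem hval_bidx (c : Char) (cnt : Int) :
    (if c = '(' then cnt + 1 else if c = ')' then cnt - 1 else cnt) = cnt + vP c := by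
  by_cases h1 : c = '(' <;> by_cases h2 : c = ')' <;> simp [h1, h2, vP] <;> omega

theorem bidxAux_shift (l : List Char) (cnt : Int) (i : Nat) :
    balancedIndexAux cnt i l = (balancedIndexAux cnt 0 l).map (· + i) := by
  induction l generalizing cnt i with
  | nil => simp [balancedIndexAux]
  | cons c rest ih =>
    simp only [balancedIndexAux]
    generalize (if c = '(' then cnt + 1 else if c = ')' then cnt - 1 else cnt) = d
    by_cases hd : d = 0
    · simp [hd]
    · simp only [if_neg hd, ih d (i + 1), ih d 1, Option.map_map]
      congr 1
      funext x
      simp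
      omega

theorem bidx_exists (l : List Char) (cnt : Int) (hne : l ≠ [])
    (hz : cnt + psum l = 0) : ∃ j, balancedIndexAux cnt 0 l = some j := by
  induction l generalizing cnt with
  | nil => exact absurd rfl hne
  | cons c rest ih =>
    simp only [balancedIndexAux]
    rw [hval_bidx c cnt]
    by_cases hcz : cnt + vP c = 0
    · exact ⟨0, by rw [if_pos hcz]⟩
    · have hrest : rest ≠ [] := by
        rintro rfl
        simp [psum] at hz
        omega
      have hz' : (cnt + vP c) + psum rest = 0 := by
        simp [psum] at hz ⊢
        omega
      obtain ⟨j, hj⟩ := ih (cnt + vP c) hrest hz'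
      refine ⟨j + 1, ?_⟩
      rw [if_neg hcz, bidxAux_shift, hj]
      rfl

theorem bidx_spec (l : List Char) (cnt : Int) (j : Nat)
    (hj : balancedIndexAux cnt 0 l = some j) :
    j < l.length ∧ cnt + psum (l.take (j + 1)) = 0 := by
  induction l generalizing cnt j with
  | nil => simp [balancedIndexAux] at hj
  | cons c rest ih =>
    simp only [balancedIndexAux] at hj
    rw [hval_bidx c cnt] at hj
    by_cases hcz : cnt + vP c = 0
    · rw [if_pos hcz] at hj
      obtain rfl : (0 : Nat) = j := by simpa using hj
      exact ⟨by simp, by simpa [psum] using hcz⟩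
    · rw [if_neg hcz, bidxAux_shift] at hj
      obtain ⟨j', hj', rfl⟩ : ∃ j', balancedIndexAux (cnt + vP c) 0 rest = some j' ∧ j = j' + 1 := by
        cases hb : balancedIndexAux (cnt + vP c) 0 rest <;> rw [hb] at hj <;> simp at hj
        exact ⟨_, rfl, hj.symm⟩
      obtain ⟨h1, h2⟩ := ih (cnt + vP c) j' hj'
      refine ⟨by simpa using Nat.succ_lt_succ h1, ?_⟩
      simp [psum] at h2 ⊢
      omega

-- the checker-state update performed by segAux, as a fold step
def ckStep (s : Int × Bool) (c : Char) : Int × Bool :=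
  (if c = '(' then s.1 + 1 else if s.1 = 0 then s.1 else s.1 - 1,
   if c = '(' then s.2 else if s.1 = 0 then false else s.2)

theorem ck_false (u : List Char) (chk : Int) :
    (u.foldl ckStep (chk, false)).2 = false := by
  induction u generalizing chk with
  | nil => rfl
  | cons c rest ih =>
    simp only [List.foldl_cons, ckStep]
    by_cases h1 : c = '(' <;> by_cases h2 : chk = 0 <;> simp [h1, h2, ih]

theorem ck_check (u : List Char) (chk : Int) :
    (u.foldl ckStep (chk, true)).2 = checkRightAux chk u := by
  induction u generalizing chk with
  | nil => rfl
  | cons c rest ih =>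
    simp only [List.foldl_cons, ckStep, checkRightAux]
    by_cases h1 : c = '(' <;> by_cases h2 : chk = 0 <;>
      simp [h1, h2, ih, ck_false]

theorem seg_split (l : List Char) (cnt chk : Int) (ok : Bool) (cur : List Char) (j : Nat)
    (hj : balancedIndexAux cnt 0 l = some j) :
    segAux cnt chk ok cur l =
      (cur ++ l.take (j + 1), ((l.take (j + 1)).foldl ckStep (chk, ok)).2)
        :: segAux 0 0 true [] (l.drop (j + 1)) := by
  induction l generalizing cnt chk ok cur j with
  | nil => simp [balancedIndexAux] at hj
  | cons c rest ih =>
    simp only [balancedIndexAux] at hj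
    rw [hval_bidx c cnt] at hj
    simp only [segAux, hval_bidx c cnt]
    by_cases hcz : cnt + vP c = 0
    · rw [if_pos hcz] at hj
      obtain rfl : (0 : Nat) = j := by simpa using hj
      rw [if_pos hcz]
      simp [ckStep]
    · rw [if_neg hcz, bidxAux_shift] at hj
      obtain ⟨j', hj', rfl⟩ : ∃ j', balancedIndexAux (cnt + vP c) 0 rest = some j' ∧ j = j' + 1 := by
        cases hb : balancedIndexAux (cnt + vP c) 0 rest <;> rw [hb] at hj <;> simp at hj
        exact ⟨_, rfl, hj.symm⟩
      rw [if_neg hcz, ih (cnt + vP c) _ _ (cur ++ [c]) j' hj']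
      simp [ckStep]

-- recursive form of B's second pass
def Tfold : List (List Char × Bool) → List Char
  | [] => []
  | s :: rest => if s.2 then s.1 ++ Tfold rest else '(' :: (Tfold rest ++ ')' :: flipB s.1)

theorem foldFB_acc (segs : List (List Char × Bool)) (fronts backs : List (List Char)) :
    segs.foldl stepFB (fronts, backs) =
      (fronts ++ (segs.foldl stepFB ([], [])).1, backs ++ (segs.foldl stepFB ([], [])).2) := by
  induction segs generalizing fronts backs with
  | nil => simp
  | cons s rest ih =>
    by_cases hs : s.2
    · simp only [List.foldl_cons, stepFB, if_pos hs]
      rw [ih (fronts ++ [s.1]) backs, ih ([] ++ [s.1]) []]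
      simp
    · simp only [List.foldl_cons, stepFB, if_neg hs]
      rw [ih (fronts ++ [['(']]) (backs ++ [')' :: flipB s.1]),
        ih ([] ++ [['(']]) ([] ++ [')' :: flipB s.1])]
      simp

theorem solB_T (segs : List (List Char × Bool)) :
    (segs.foldl stepFB ([], [])).1.flatten ++ (segs.foldl stepFB ([], [])).2.reverse.flatten
      = Tfold segs := by
  induction segs with
  | nil => rfl
  | cons s rest ih =>
    by_cases hs : s.2
    · simp only [List.foldl_cons, stepFB, if_pos hs, Tfold]
      rw [foldFB_acc, ← ih]
      simp
    · simp only [List.foldl_cons, stepFB, if_neg hs, Tfold]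
      rw [foldFB_acc, ← ih]
      simp [List.flatten_append, List.append_assoc]

theorem main_list (n : Nat) (l : List Char) (hn : l.length ≤ n)
    (hz : psum l = 0) : solA l = Tfold (segAux 0 0 true [] l) := by
  induction n generalizing l with
  | zero =>
    have hl : l = [] := List.eq_nil_of_length_eq_zero (by omega)
    subst hl
    rw [solA]
    simp [segAux, Tfold]
  | succ n ih =>
    by_cases hnil : l = []
    · subst hnil
      rw [solA]
      simp [segAux, Tfold]
    · obtain ⟨j, hj⟩ := bidx_exists l 0 hnil (by omega)
      obtain ⟨hjlen, hzu⟩ := bidx_spec l 0 j hj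
      have hseg : segAux 0 0 true [] l =
          (l.take (j + 1), ((l.take (j + 1)).foldl ckStep (0, true)).2)
            :: segAux 0 0 true [] (l.drop (j + 1)) := by
        simpa using seg_split l 0 0 true [] j hj
      have hpv : psum (l.drop (j + 1)) = 0 := by
        have := psum_append (l.take (j + 1)) (l.drop (j + 1))
        rw [List.take_append_drop] at this
        omega
      have hvlen : (l.drop (j + 1)).length ≤ n := by
        simp [List.length_drop]
        omega
      have ihv := ih (l.drop (j + 1)) hvlen hpv
      have hok : ((l.take (j + 1)).foldl ckStep (0, true)).2 = checkRight (l.take (j + 1)) :=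
        ck_check (l.take (j + 1)) 0
      rw [solA.eq_def, dif_neg hnil, show balancedIndex l = some j from hj]
      dsimp only
      rw [hseg]
      by_cases hcr : checkRight (l.take (j + 1)) = true
      · rw [if_pos hcr, ihv]
        simp [Tfold, hok, hcr]
      · rw [if_neg hcr, ihv]
        simp only [Bool.not_eq_true] at hcr
        simp [Tfold, hok, hcr, flipB]

-- ===== VERDICT (by name: the statement is the Claim_ definition above) =====
theorem solution_spec : Claim_equal_solution := by
  intro p _ hpre
  unfold Spec_solution solution solution_alt
  have hz : psum p.toList = 0 := by
    have h1 := psum_count p.toList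
    have h2 : p.toList.count '(' = p.toList.count ')' := hpre
    omega
  apply congrArg
  rw [main_list p.toList.length p.toList le_rfl hz]
  show _ = solB p.toList
  unfold solB
  exact (solB_T _).symm
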